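-- pv_equiv track=rewrite | github.com/manivaradarajan/grantha-data | tools/scripts/devanagari_tools/sync_yaml_headers.py | extract_universal_fields
-- ===== SOURCE A (Python) =====
-- from typing import Any, Dict, List, Tuple
--
-- def extract_universal_fields(files_data: Dict) -> List[str]:
--     """Extract fields that are present in ALL files.
--
--     Args:
--         files_data: Dictionary mapping filename to FileData
--
--     Returns:
--         List of field names present in all files
--     """
--     if not files_data:
--         return []
--
--     # Get field sets for each file
--     field_sets = [set(data['frontmatter'].keys()) for data in files_data.values()]
--
--     # Intersect all sets to find universal fields
--     universal = field_sets[0]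
--     for field_set in field_sets[1:]:
--         universal &= field_set
--
--     return sorted(list(universal))
-- ===== SOURCE B (Python) =====
-- def extract_universal_fields(files_data):
--     """Extract fields that are present in ALL files (tally pass instead of set intersections)."""
--     n = len(files_data)
--     if n == 0:
--         return []
--     counts = {}
--     for data in files_data.values():
--         for field in data['frontmatter'].keys():
--             counts[field] = counts.get(field, 0) + 1
--     return sorted(f for f, c in counts.items() if c == n)
-- ===== Notes on version B (the rewrite author's own statement) =====
-- stated objective: idiomatic
-- what changed: Replaces per-file set building plus iterated set intersection with a single frequency tally over all frontmatter keys followed by a count==len(files_data) filter.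
import Mathlib
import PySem

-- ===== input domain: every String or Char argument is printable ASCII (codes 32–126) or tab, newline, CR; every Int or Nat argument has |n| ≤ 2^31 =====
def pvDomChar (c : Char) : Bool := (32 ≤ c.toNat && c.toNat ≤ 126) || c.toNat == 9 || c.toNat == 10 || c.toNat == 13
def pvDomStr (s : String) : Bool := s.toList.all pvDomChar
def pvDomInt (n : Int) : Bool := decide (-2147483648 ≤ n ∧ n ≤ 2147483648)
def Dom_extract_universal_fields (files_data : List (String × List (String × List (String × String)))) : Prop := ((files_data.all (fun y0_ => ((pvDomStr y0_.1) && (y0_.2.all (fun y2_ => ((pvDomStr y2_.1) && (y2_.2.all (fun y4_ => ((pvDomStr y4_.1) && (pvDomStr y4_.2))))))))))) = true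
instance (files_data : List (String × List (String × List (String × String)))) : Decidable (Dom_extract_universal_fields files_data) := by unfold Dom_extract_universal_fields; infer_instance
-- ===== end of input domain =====

-- B tallies key frequencies in one pass and keeps keys seen len(files_data) times, instead of A's set intersections.
-- data['frontmatter'].keys(), shared by both ports (exact under Pre_, which guarantees the key exists)
def pvFmKeys (data : List (String × List (String × String))) : List String :=
  (PySem.Dict.ofList ((PySem.Dict.ofList data).getD "frontmatter" [])).keys

-- ===== PORT A =====
def extract_universal_fields (files_data : List (String × List (String × List (String × String)))) : List String :=
  let d := PySem.Dict.ofList files_data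
  if d.size = 0 then []
  else
    let field_sets := d.values.map (fun data => PySem.Set.ofList (pvFmKeys data))
    match field_sets with
    | [] => []
    | u0 :: rest =>
      let universal := rest.foldl PySem.Set.inter u0
      PySem.List.sorted universal (fun x => x) false

-- ===== PORT B =====
def extract_universal_fields_alt (files_data : List (String × List (String × List (String × String)))) : List String :=
  let d := PySem.Dict.ofList files_data
  let n := d.size
  if n = 0 then []
  else
    let counts := d.values.foldl
      (fun c data => (pvFmKeys data).foldl
        (fun c field => c.insert field (c.getD field 0 + 1)) c)
      PySem.Dict.empty
    PySem.List.sorted ((counts.items.filter (fun p => p.2 == (n : Int))).map (fun p => p.1)) (fun x => x) false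

-- ===== PRECONDITION & SPEC =====
-- Pre_ excludes exactly the inputs where some file's data lacks the key "frontmatter": there Python A raises KeyError.
def Pre_extract_universal_fields (files_data : List (String × List (String × List (String × String)))) : Prop :=
  ∀ data ∈ (PySem.Dict.ofList files_data).values, (PySem.Dict.ofList data).contains "frontmatter" = true
instance (files_data : List (String × List (String × List (String × String)))) : Decidable (Pre_extract_universal_fields files_data) := by unfold Pre_extract_universal_fields; infer_instance
def pvWitness_extract_universal_fields : (List (String × List (String × List (String × String)))) :=
  [("a", [("frontmatter", [("title", "x"), ("id", "1")])]), ("b", [("frontmatter", [("title", "y")])])]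
def Spec_extract_universal_fields (files_data : List (String × List (String × List (String × String)))) (out : List String) : Prop := out = extract_universal_fields_alt files_data
instance (files_data : List (String × List (String × List (String × String)))) (out : List String) : Decidable (Spec_extract_universal_fields files_data out) := by unfold Spec_extract_universal_fields; infer_instance

-- ===== CLAIM (what is proved, stated in full; the proofs are below) =====
def Claim_equal_extract_universal_fields : Prop := ∀ (files_data : List (String × List (String × List (String × String)))), Dom_extract_universal_fields files_data → Pre_extract_universal_fields files_data → Spec_extract_universal_fields files_data (extract_universal_fields files_data)

-- ===== LEMMAS AND PROOFS =====

lemma pvFmKeys_nodup (data : List (String × List (String × String))) : (pvFmKeys data).Nodup :=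
  PySem.Dict.nodup_keys_ofList _

lemma mem_foldl_inter (ts : List (PySem.Set String)) (s : PySem.Set String) (x : String) :
    x ∈ ts.foldl PySem.Set.inter s ↔ x ∈ s ∧ ∀ t ∈ ts, x ∈ t := by
  induction ts generalizing s with
  | nil => simp
  | cons t ts ih =>
    simp only [List.foldl_cons, ih, PySem.Set.mem_inter, List.mem_cons]
    constructor
    · rintro ⟨⟨hs, ht⟩, hrest⟩
      exact ⟨hs, fun u hu => hu.elim (fun h => h ▸ ht) (hrest u)⟩
    · rintro ⟨hs, hall⟩
      exact ⟨⟨hs, hall t (Or.inl rfl)⟩, fun u hu => hall u (Or.inr hu)⟩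

lemma nodup_foldl_inter (ts : List (PySem.Set String)) (s : PySem.Set String) (h : s.Nodup) :
    (ts.foldl PySem.Set.inter s).Nodup := by
  induction ts generalizing s with
  | nil => exact h
  | cons t ts ih => exact ih _ (PySem.Set.nodup_inter _ _ h)

lemma sorted_congr_perm (l₁ l₂ : List String) (hp : l₁.Perm l₂) (hnd : l₂.Nodup) :
    PySem.List.sorted l₁ (fun x => x) false = PySem.List.sorted l₂ (fun x => x) false := by
  apply PySem.List.sorted_eq_of_perm_of_pairwise_lt
  · exact (PySem.List.sorted_perm l₂ _ _).trans hp.symm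
  · have hle := PySem.List.sorted_pairwise l₂ (fun x : String => x)
    have hnd' : (PySem.List.sorted l₂ (fun x => x) false).Nodup :=
      ((PySem.List.sorted_perm l₂ (fun x => x) false).nodup_iff).mpr hnd
    exact (hle.and hnd').imp fun h => lt_of_le_of_ne h.1 h.2

lemma count_flatMap_fmKeys (vs : List (List (String × List (String × String)))) (x : String) :
    (vs.flatMap pvFmKeys).count x = vs.countP (fun dd => decide (x ∈ pvFmKeys dd)) := by
  induction vs with
  | nil => simp
  | cons v vt ih =>
    simp only [List.flatMap_cons, List.count_append, List.countP_cons, ih]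
    by_cases hx : x ∈ pvFmKeys v
    · rw [List.count_eq_one_of_mem (pvFmKeys_nodup v) hx]; simp [hx]; omega
    · rw [List.count_eq_zero.mpr hx]; simp [hx]
-- ===== VERDICT (by name: the statement is the Claim_ definition above) =====
theorem extract_universal_fields_spec : Claim_equal_extract_universal_fields := by
  intro fd _ _
  show extract_universal_fields fd = extract_universal_fields_alt fd
  unfold extract_universal_fields extract_universal_fields_alt
  set d := PySem.Dict.ofList fd with hd
  by_cases h0 : d.size = 0
  · simp [h0]
  · simp only [h0, ite_false]
    set vs := d.values with hvs
    have hlen : vs.length = d.size := by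
      simp [hvs, PySem.Dict.values, PySem.Dict.size]
    have hne : vs ≠ [] := by
      intro h; apply h0; rw [← hlen, h]; rfl
    obtain ⟨v0, vt, hcons⟩ := List.exists_cons_of_ne_nil hne
    rw [hcons]
    simp only [List.map_cons]
    -- B side: nested foldl = counter of the concatenation of all key lists
    set L := (v0 :: vt).flatMap pvFmKeys with hL
    have hfold : (v0 :: vt).foldl
        (fun c data => (pvFmKeys data).foldl
          (fun c field => c.insert field (c.getD field 0 + 1)) c)
        PySem.Dict.empty = PySem.Dict.counter L := by
      rw [hL, ← List.foldl_flatMap, PySem.Dict.foldl_insert_getD_add_one_eq_counter]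
    rw [hfold, PySem.Dict.items_counter, List.filter_map, List.map_map]
    have hmapfst : ((fun p : String × Int => p.1) ∘ fun k => (k, (L.count k : Int))) = id := rfl
    rw [hmapfst, List.map_id]
    -- both sides are sorts of nodup lists with the same members
    set Alist := (vt.map (fun data => PySem.Set.ofList (pvFmKeys data))).foldl
      PySem.Set.inter (PySem.Set.ofList (pvFmKeys v0)) with hA
    set Blist := (PySem.Set.ofList L).filter
      ((fun p : String × Int => p.2 == (d.size : Int)) ∘ fun k => (k, (L.count k : Int))) with hB
    have hndA : Alist.Nodup := nodup_foldl_inter _ _ (PySem.Set.nodup_ofList _)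
    have hndB : Blist.Nodup := (PySem.Set.nodup_ofList L).filter _
    have hmem : ∀ x, x ∈ Alist ↔ x ∈ Blist := by
      intro x
      rw [hA, mem_foldl_inter, hB, List.mem_filter, PySem.Set.mem_ofList]
      simp only [Function.comp_apply, beq_iff_eq, PySem.Set.mem_ofList]
      constructor
      · rintro ⟨h0m, hrest⟩
        have hall : ∀ dd ∈ (v0 :: vt), x ∈ pvFmKeys dd := by
          intro dd hdd
          rcases List.mem_cons.mp hdd with h | h
          · exact h ▸ h0m
          · exact (PySem.Set.mem_ofList _ _).mp (hrest _ (List.mem_map_of_mem h))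
        refine ⟨List.mem_flatMap.mpr ⟨v0, List.mem_cons_self, hall v0 List.mem_cons_self⟩, ?_⟩
        have : L.count x = (v0 :: vt).length := by
          rw [hL, count_flatMap_fmKeys, List.countP_eq_length]
          intro a ha; exact decide_eq_true (hall a ha)
        rw [this, ← hlen, hcons]
      · rintro ⟨hxL, hcnt⟩
        have hcnt' : L.count x = (v0 :: vt).length := by
          have := hcnt
          rw [← hlen, hcons] at this
          exact_mod_cast this
        have hall : ∀ dd ∈ (v0 :: vt), x ∈ pvFmKeys dd := by
          rw [hL, count_flatMap_fmKeys, List.countP_eq_length] at hcnt'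
          intro dd hdd; exact of_decide_eq_true (hcnt' dd hdd)
        refine ⟨hall v0 List.mem_cons_self, ?_⟩
        intro t ht
        obtain ⟨dd, hdd, rfl⟩ := List.mem_map.mp ht
        exact (PySem.Set.mem_ofList _ _).mpr (hall dd (List.mem_cons_of_mem _ hdd))
    exact sorted_congr_perm _ _ ((List.perm_ext_iff_of_nodup hndA hndB).mpr hmem) hndB
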